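-- pv_equiv track=rewrite | github.com/TaterTotterson/Tater_Shop | verba/premiumize_add_transfer.py | _infer_status_filter_from_query
-- ===== SOURCE A (Python) =====
-- def _infer_status_filter_from_query(query: str) -> str:
--     text = str(query or "").lower()
--     if any(token in text for token in ("active", "running", "queued", "in progress", "downloading")):
--         return "active"
--     if any(token in text for token in ("finished", "complete", "completed", "done", "success")):
--         return "finished"
--     if any(token in text for token in ("failed", "error")):
--         return "failed"
--     if "all" in text:
--         return "all"
--     return ""
-- ===== SOURCE B (Python) =====
-- # B: single left-to-right scan over the text, keeping the best (lowest) priority rank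
-- # of any keyword that starts at the current position; A instead runs 13 separate
-- # whole-string substring searches in four staged if-branches.
-- _RANKED_TOKENS = (
--     ("active", 0), ("running", 0), ("queued", 0), ("in progress", 0), ("downloading", 0),
--     ("finished", 1), ("complete", 1), ("completed", 1), ("done", 1), ("success", 1),
--     ("failed", 2), ("error", 2),
--     ("all", 3),
-- )
-- _STATUS_NAMES = ("active", "finished", "failed", "all", "")
--
-- def _infer_status_filter_from_query(query: str) -> str:
--     text = str(query or "").lower()
--     best = 4
--     for i in range(len(text)):
--         for tok, rank in _RANKED_TOKENS:
--             if rank < best and text.startswith(tok, i):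
--                 best = rank
--     return _STATUS_NAMES[best]
-- ===== Notes on version B (the rewrite author's own statement) =====
-- stated objective: alternative
-- what changed: Replaced A's four staged if-branches of 13 independent whole-string substring searches by a single left-to-right scan over the text positions that keeps the lowest priority rank of any keyword starting at the current position, mapping the final rank to its status name at the end.
import Mathlib
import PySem

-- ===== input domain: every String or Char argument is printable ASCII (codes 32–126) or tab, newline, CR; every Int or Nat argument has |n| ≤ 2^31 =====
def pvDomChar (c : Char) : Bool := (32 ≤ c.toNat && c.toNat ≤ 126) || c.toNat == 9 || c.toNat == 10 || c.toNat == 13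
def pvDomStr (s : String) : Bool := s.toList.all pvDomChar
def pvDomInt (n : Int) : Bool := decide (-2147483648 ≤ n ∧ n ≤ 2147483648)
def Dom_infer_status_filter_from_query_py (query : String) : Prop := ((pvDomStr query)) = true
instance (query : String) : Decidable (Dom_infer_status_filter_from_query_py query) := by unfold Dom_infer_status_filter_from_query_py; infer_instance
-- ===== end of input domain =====

-- B replaces A's staged chain of whole-string substring searches by one positional
-- scan of the text keeping the best-priority keyword rank (alternative decomposition, same cost).


-- ===== PORT A =====
def infer_status_filter_from_query_py (query : String) : String :=
  let text := PySem.Str.lower query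
  if PySem.Str.isIn "active" text || PySem.Str.isIn "running" text || PySem.Str.isIn "queued" text || PySem.Str.isIn "in progress" text || PySem.Str.isIn "downloading" text then "active"
  else if PySem.Str.isIn "finished" text || PySem.Str.isIn "complete" text || PySem.Str.isIn "completed" text || PySem.Str.isIn "done" text || PySem.Str.isIn "success" text then "finished"
  else if PySem.Str.isIn "failed" text || PySem.Str.isIn "error" text then "failed"
  else if PySem.Str.isIn "all" text then "all"
  else ""

-- ===== PORT B =====
-- _RANKED_TOKENS (tokens as char lists so startswith is List.isPrefixOf on the lowered text)
def pvRankedTokens : List (List Char × Nat) :=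
  [("active".toList, 0), ("running".toList, 0), ("queued".toList, 0), ("in progress".toList, 0), ("downloading".toList, 0),
   ("finished".toList, 1), ("complete".toList, 1), ("completed".toList, 1), ("done".toList, 1), ("success".toList, 1),
   ("failed".toList, 2), ("error".toList, 2),
   ("all".toList, 3)]

def pvStatusNames : List String := ["active", "finished", "failed", "all", ""]

-- single scan over positions i of the lowered text; 'text.startswith(tok, i)' is
-- tok.isPrefixOf (text.drop i); best starts at 4; _STATUS_NAMES[best] is getD (best ≤ 4
-- always holds, so the default is unreachable and Python never raises here)
def infer_status_filter_from_query_py_alt (query : String) : String :=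
  let text := (PySem.Str.lower query).toList
  let best := (List.range text.length).foldl
    (fun b i => pvRankedTokens.foldl
      (fun b p => if p.2 < b && p.1.isPrefixOf (text.drop i) then p.2 else b) b) 4
  pvStatusNames.getD best ""

-- ===== PRECONDITION & SPEC =====
def Spec_infer_status_filter_from_query_py (query : String) (out : String) : Prop := out = infer_status_filter_from_query_py_alt query
instance (query : String) (out : String) : Decidable (Spec_infer_status_filter_from_query_py query out) := by unfold Spec_infer_status_filter_from_query_py; infer_instance

-- ===== CLAIM (what is proved, stated in full; the proofs are below) =====
def Claim_equal_infer_status_filter_from_query_py : Prop := ∀ (query : String), Dom_infer_status_filter_from_query_py query → Spec_infer_status_filter_from_query_py query (infer_status_filter_from_query_py query)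

-- ===== LEMMAS AND PROOFS =====

-- the guarded update step is a conditional min
lemma pvStep_eq_min (b r : Nat) (c : Bool) :
    (if r < b && c then r else b) = (if c then min b r else b) := by
  cases c
  · simp
  · by_cases h : r < b
    · simp [h, Nat.le_of_lt h]
    · simp [h, Nat.le_of_not_lt h]

-- pulling the accumulator out of a min-fold
lemma pvFoldl_min (l : List Nat) : ∀ b b' : Nat,
    l.foldl min (min b b') = min b (l.foldl min b') := by
  induction l with
  | nil => intro b b'; rfl
  | cons a t ih =>
    intro b b'
    simp only [List.foldl_cons, Nat.min_assoc, ih]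

-- a conditional-min fold is a min-fold over the filtered, mapped list
lemma pvFoldl_condMin {α : Type} (c : α → Bool) (g : α → Nat) (l : List α) : ∀ b : Nat,
    l.foldl (fun b p => if c p then min b (g p) else b) b
      = ((l.filter c).map g).foldl min b := by
  induction l with
  | nil => intro b; rfl
  | cons a t ih =>
    intro b
    by_cases h : c a = true <;> simp [h, ih]

-- fold of min over a list of ranks < 4 is the first-present rank
lemma pvFoldl_min_chain (l : List Nat) (hl : ∀ x ∈ l, x < 4) :
    l.foldl min 4 =
      (if 0 ∈ l then 0 else if 1 ∈ l then 1 else if 2 ∈ l then 2 else if 3 ∈ l then 3 else 4) := by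
  induction l with
  | nil => rfl
  | cons a t ih =>
    have ha : a < 4 := hl a (List.mem_cons_self ..)
    have ht : ∀ x ∈ t, x < 4 := fun x hx => hl x (List.mem_cons_of_mem _ hx)
    have : (a :: t).foldl min 4 = min a (t.foldl min 4) := by
      simpa [Nat.min_comm] using pvFoldl_min t a 4
    rw [this, ih ht]
    interval_cases a <;> split_ifs <;> simp_all

-- folding position-wise min-folds is a min-fold over the flattened match list
lemma pvFoldl_flat {α : Type} (f : α → List Nat) : ∀ (L : List α) (b : Nat),
    L.foldl (fun b i => (f i).foldl min b) b = (L.flatMap f).foldl min b := by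
  intro L
  induction L with
  | nil => intro b; rfl
  | cons a t ih => intro b; simp [List.foldl_append, ih]

-- a nonempty token occurs at some scan position iff it is an infix of the text
lemma pvOccurs_iff (tok text : List Char) (h : tok ≠ []) :
    (∃ i < text.length, tok.isPrefixOf (text.drop i) = true) ↔ tok <:+: text := by
  simp only [List.isPrefixOf_iff_prefix]
  constructor
  · rintro ⟨i, _, hp⟩
    exact hp.isInfix.trans (text.drop_suffix i).isInfix
  · rintro ⟨s, t, rfl⟩
    refine ⟨s.length, ?_, ?_⟩
    · have : tok.length ≠ 0 := fun hc => h (List.eq_nil_of_length_eq_zero hc)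
      simp [List.length_append]; omega
    · have : List.drop s.length (s ++ tok ++ t) = tok ++ t := by
        rw [List.append_assoc, List.drop_left]
      rw [this]; exact ⟨t, rfl⟩
  
-- ===== VERDICT (by name: the statement is the Claim_ definition above) =====
theorem infer_status_filter_from_query_py_spec : Claim_equal_infer_status_filter_from_query_py := by
  intro query _
  unfold Spec_infer_status_filter_from_query_py
  unfold infer_status_filter_from_query_py infer_status_filter_from_query_py_alt
  simp only [pvStep_eq_min, pvFoldl_condMin, pvFoldl_flat]
  rw [pvFoldl_min_chain]
  · set text := (PySem.Str.lower query).toList with htext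
    have hmem : ∀ r : Nat,
        (r ∈ (List.range text.length).flatMap
            (fun i => ((pvRankedTokens.filter (fun p => p.1.isPrefixOf (text.drop i))).map (fun p => p.2))))
        ↔ ∃ p ∈ pvRankedTokens, p.2 = r ∧ ∃ i < text.length, p.1.isPrefixOf (text.drop i) = true := by
      intro r
      simp only [List.mem_flatMap, List.mem_map, List.mem_filter, List.mem_range]
      constructor
      · rintro ⟨i, hi, p, ⟨hp, hpref⟩, rfl⟩; exact ⟨p, hp, rfl, i, hi, hpref⟩
      · rintro ⟨p, hp, rfl, i, hi, hpref⟩; exact ⟨i, hi, p, ⟨hp, hpref⟩, rfl⟩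
    have hocc : ∀ tok : List Char, tok ≠ [] →
        ((∃ i < text.length, tok.isPrefixOf (text.drop i) = true) ↔ tok <:+: text) :=
      fun tok h => pvOccurs_iff tok text h
    simp only [hmem]
    simp only [pvRankedTokens, List.mem_cons, List.not_mem_nil, or_false,
      exists_eq_or_imp, exists_eq_left]
    simp only [Bool.or_eq_true, PySem.Str.isIn_iff_infix, ← htext]
    simp only [hocc "active".toList (by decide), hocc "running".toList (by decide),
      hocc "queued".toList (by decide), hocc "in progress".toList (by decide),
      hocc "downloading".toList (by decide), hocc "finished".toList (by decide),
      hocc "complete".toList (by decide), hocc "completed".toList (by decide),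
      hocc "done".toList (by decide), hocc "success".toList (by decide),
      hocc "failed".toList (by decide), hocc "error".toList (by decide),
      hocc "all".toList (by decide), true_and, or_false, false_or, false_and, reduceCtorEq]
    norm_num
    split_ifs <;> simp_all [pvStatusNames]
  · intro x hx
    simp only [List.mem_flatMap, List.mem_map, List.mem_filter] at hx
    obtain ⟨i, -, p, ⟨hp, -⟩, rfl⟩ := hx
    have : ∀ p ∈ pvRankedTokens, p.2 < 4 := by decide
    exact this p hp
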